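-- pv_equiv track=rewrite | github.com/jhmarryme/Python-in-action | inbox/2024_company_algorithm/A15_相似的物种/entry.py | find_max_subsequence
-- ===== SOURCE A (Python) =====
-- from collections import defaultdict
--
-- def find_max_subsequence(dna_seq: [str]) -> [str]:
--     # 判断给定长度的子序列，是否出现在超过半数的DNA序列中
--     def find_common_subsequences(length):
--         subsequence_count = defaultdict(int)
--
--         # 遍历每一个DNA序列，使用滑动窗口提取所有长度为length的子序列
--         for seq in dna_seq:
--             seen = set()  # 用于防止同一个子序列在同一个DNA序列中重复计数
--             for i in range(len(seq) - length + 1):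
--                 subseq = seq[i:i + length]
--                 if subseq not in seen:
--                     subsequence_count[subseq] += 1
--                     seen.add(subseq)
--
--         # 过滤出出现在超过半数的子序列
--         return [subseq for subseq, count in subsequence_count.items() if count > len(dna_seq) // 2]
--
--     # 从最长可能的子序列长度开始尝试，逐步减少长度
--     max_length = min(len(seq) for seq in dna_seq)  # 最大子序列长度为最短DNA序列的长度
--     for length in range(max_length, 0, -1):
--         common_subsequences = find_common_subsequences(length)
--         if common_subsequences:
--             return sorted(common_subsequences)  # 按字典顺序返回结果
--
--     return []
-- ===== SOURCE B (Python) =====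
-- from collections import defaultdict
--
-- def find_max_subsequence(dna_seq):
--     # Ascending length scan keeping the last non-empty answer; per sequence the
--     # distinct windows are collected as a set and batch-counted (no seen-guard
--     # inside the window loop, no early return).
--     n = len(dna_seq)
--     half = n // 2
--     max_length = min(len(seq) for seq in dna_seq)
--     best = []
--     for length in range(1, max_length + 1):
--         counts = defaultdict(int)
--         for seq in dna_seq:
--             for sub in {seq[i:i + length] for i in range(len(seq) - length + 1)}:
--                 counts[sub] += 1
--         current = sorted(sub for sub, c in counts.items() if c > half)
--         if current:
--             best = current
--     return best
-- ===== Notes on version B (the rewrite author's own statement) =====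
-- stated objective: alternative
-- what changed: B scans candidate lengths ascending with a keep-last-nonempty accumulator instead of A's descending early-return loop, and counts each sequence's distinct windows by building the window set first and batch-incrementing, instead of A's seen-guarded increment inside the window loop.
import Mathlib
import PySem

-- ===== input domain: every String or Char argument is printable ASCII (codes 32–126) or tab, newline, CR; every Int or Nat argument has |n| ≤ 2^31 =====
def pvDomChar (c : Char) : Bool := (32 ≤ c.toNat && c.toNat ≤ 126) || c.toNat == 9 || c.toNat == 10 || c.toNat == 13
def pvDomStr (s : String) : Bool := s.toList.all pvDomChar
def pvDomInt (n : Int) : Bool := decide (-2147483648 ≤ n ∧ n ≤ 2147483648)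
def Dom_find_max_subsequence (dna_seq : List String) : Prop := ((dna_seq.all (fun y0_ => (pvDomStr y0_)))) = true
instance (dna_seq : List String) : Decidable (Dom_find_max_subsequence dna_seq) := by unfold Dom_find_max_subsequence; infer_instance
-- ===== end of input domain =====

-- B scans lengths ascending keeping the last non-empty result and batch-counts each
-- sequence's distinct windows via a set, instead of A's descending early-return loop
-- with a seen-guarded increment per window (objective: alternative; same answers).

-- ===== PORT A =====
-- find_common_subsequences(length): dict of window counts (one per sequence, seen-guarded), then filter
def find_max_subsequence_common (dna_seq : List String) (length : Int) : List String :=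
  let subsequence_count : PySem.Dict String Int :=
    dna_seq.foldl (fun d seq =>
      ((PySem.List.pyRange 0 (PySem.Str.len seq - length + 1) 1).foldl
        (fun (p : PySem.Dict String Int × PySem.Set String) i =>
          let subseq := PySem.Str.slice seq (some i) (some (i + length))
          if PySem.Set.contains p.2 subseq then p
          else (p.1.modify subseq 0 (· + 1), PySem.Set.add p.2 subseq))
        (d, PySem.Set.empty)).1)
      PySem.Dict.empty
  (subsequence_count.items.filter
    (fun p => p.2 > PySem.Int.floordiv (PySem.List.len dna_seq) 2)).map Prod.fst

-- for length in range(max_length, 0, -1): early return of sorted(common) when non-empty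
def find_max_subsequence_loop (dna_seq : List String) : List Int → List String
  | [] => []
  | length :: rest =>
    let common_subsequences := find_max_subsequence_common dna_seq length
    if common_subsequences.isEmpty then find_max_subsequence_loop dna_seq rest
    else PySem.List.sorted common_subsequences (fun x => x)

def find_max_subsequence (dna_seq : List String) : List String :=
  -- min() of an empty iterable raises ValueError: the none branch is excluded by Pre_
  match PySem.List.min? (dna_seq.map PySem.Str.len) (fun x => x) with
  | none => []
  | some max_length => find_max_subsequence_loop dna_seq (PySem.List.pyRange max_length 0 (-1))

-- ===== PORT B =====
-- per length: counts[sub] += 1 for sub in {windows of seq} (batch increment from a set)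
def find_max_subsequence_alt_count (dna_seq : List String) (length : Int) : PySem.Dict String Int :=
  dna_seq.foldl (fun counts seq =>
    (PySem.Set.ofList ((PySem.List.pyRange 0 (PySem.Str.len seq - length + 1) 1).map
        (fun i => PySem.Str.slice seq (some i) (some (i + length))))).foldl
      (fun counts sub => counts.modify sub 0 (· + 1)) counts)
    PySem.Dict.empty

def find_max_subsequence_alt (dna_seq : List String) : List String :=
  match PySem.List.min? (dna_seq.map PySem.Str.len) (fun x => x) with
  | none => []  -- min() of an empty iterable raises: excluded by Pre_
  | some max_length =>
    let half := PySem.Int.floordiv (PySem.List.len dna_seq) 2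
    (PySem.List.pyRange 1 (max_length + 1) 1).foldl (fun best length =>
      let counts := find_max_subsequence_alt_count dna_seq length
      let current := PySem.List.sorted
        ((counts.items.filter (fun p => p.2 > half)).map Prod.fst) (fun x => x)
      if current.isEmpty then best else current) []

-- ===== PRECONDITION & SPEC =====
-- A raises ValueError (min of an empty sequence) on the empty list; B does too. Excluded.
def Pre_find_max_subsequence (dna_seq : List String) : Prop := dna_seq ≠ []
instance (dna_seq : List String) : Decidable (Pre_find_max_subsequence dna_seq) := by
  unfold Pre_find_max_subsequence; infer_instance

def pvWitness_find_max_subsequence : List String := ["ACGTA", "CGT", "TACG"]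

def Spec_find_max_subsequence (dna_seq : List String) (out : List String) : Prop := out = find_max_subsequence_alt dna_seq
instance (dna_seq : List String) (out : List String) : Decidable (Spec_find_max_subsequence dna_seq out) := by unfold Spec_find_max_subsequence; infer_instance

-- ===== CLAIM (what is proved, stated in full; the proofs are below) =====
def Claim_equal_find_max_subsequence : Prop := ∀ (dna_seq : List String), Dom_find_max_subsequence dna_seq → Pre_find_max_subsequence dna_seq → Spec_find_max_subsequence dna_seq (find_max_subsequence dna_seq)

-- ===== LEMMAS AND PROOFS =====

-- the elements of ws not yet in s, deduplicated, in first-occurrence order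
def pvNewOf (s : List String) : List String → List String
  | [] => []
  | w :: t => if w ∈ s then pvNewOf s t else w :: pvNewOf (s ++ [w]) t

theorem pvFoldlAdd_eq (ws : List String) : ∀ s : PySem.Set String,
    ws.foldl PySem.Set.add s = s ++ pvNewOf s ws := by
  induction ws with
  | nil => intro s; simp [pvNewOf]
  | cons w t ih =>
    intro s
    by_cases hm : w ∈ s
    · simp [pvNewOf, hm, List.foldl_cons, ih]
    · simp [pvNewOf, hm, List.foldl_cons, ih]

theorem pvInnerA_eq (ws : List String) : ∀ (d : PySem.Dict String Int) (s : PySem.Set String),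
    (ws.foldl (fun (p : PySem.Dict String Int × PySem.Set String) w =>
        if PySem.Set.contains p.2 w then p
        else (p.1.modify w 0 (· + 1), PySem.Set.add p.2 w)) (d, s)).1
      = (pvNewOf s ws).foldl (fun d w => d.modify w 0 (· + 1)) d := by
  induction ws with
  | nil => intro d s; simp [pvNewOf]
  | cons w t ih =>
    intro d s
    by_cases hm : w ∈ s
    · have hc : PySem.Set.contains s w = true := (PySem.Set.contains_iff s w).mpr hm
      simp only [List.foldl_cons, hc, if_true, pvNewOf, hm]
      exact ih _ _
    · have hc : PySem.Set.contains s w = false := by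
        rw [← Bool.not_eq_true, (PySem.Set.contains_iff s w)]; exact hm
      simp only [List.foldl_cons, hc, if_false, pvNewOf, hm,
        PySem.Set.add_of_not_mem hm, Bool.false_eq_true]
      exact ih _ _

theorem pvCount_eq (dna_seq : List String) (length : Int) :
    (dna_seq.foldl (fun d seq =>
      ((PySem.List.pyRange 0 (PySem.Str.len seq - length + 1) 1).foldl
        (fun (p : PySem.Dict String Int × PySem.Set String) i =>
          let subseq := PySem.Str.slice seq (some i) (some (i + length))
          if PySem.Set.contains p.2 subseq then p
          else (p.1.modify subseq 0 (· + 1), PySem.Set.add p.2 subseq))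
        (d, PySem.Set.empty)).1)
      PySem.Dict.empty)
    = find_max_subsequence_alt_count dna_seq length := by
  unfold find_max_subsequence_alt_count
  refine PySem.List.foldl_congr_mem dna_seq _ _ _ (fun d seq _ => ?_)
  have hmap := List.foldl_map
    (f := fun i => PySem.Str.slice seq (some i) (some (i + length)))
    (g := fun (p : PySem.Dict String Int × PySem.Set String) w =>
        if PySem.Set.contains p.2 w then p
        else (p.1.modify w 0 (· + 1), PySem.Set.add p.2 w))
    (l := PySem.List.pyRange 0 (PySem.Str.len seq - length + 1) 1)
    (init := (d, PySem.Set.empty))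
  simp only at hmap ⊢
  rw [← hmap, pvInnerA_eq]
  have h2 : PySem.Set.ofList ((PySem.List.pyRange 0 (PySem.Str.len seq - length + 1) 1).map
      (fun i => PySem.Str.slice seq (some i) (some (i + length))))
      = pvNewOf [] ((PySem.List.pyRange 0 (PySem.Str.len seq - length + 1) 1).map
      (fun i => PySem.Str.slice seq (some i) (some (i + length)))) := by
    rw [PySem.Set.ofList_eq_foldl, pvFoldlAdd_eq]; rfl
  rw [h2]
  rfl

theorem pvCommon_eq (dna_seq : List String) (length : Int) :
    find_max_subsequence_common dna_seq length
      = ((find_max_subsequence_alt_count dna_seq length).items.filter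
          (fun p => p.2 > PySem.Int.floordiv (PySem.List.len dna_seq) 2)).map Prod.fst := by
  unfold find_max_subsequence_common
  rw [pvCount_eq]

theorem pvLoopA_eq (dna_seq : List String) (l : List Int) :
    find_max_subsequence_loop dna_seq l
      = l.reverse.foldl (fun best length =>
          let current := PySem.List.sorted (find_max_subsequence_common dna_seq length) (fun x => x)
          if current.isEmpty then best else current) [] := by
  induction l with
  | nil => simp [find_max_subsequence_loop]
  | cons L t ih =>
    simp only [find_max_subsequence_loop, List.reverse_cons, List.foldl_append, List.foldl_cons,
      List.foldl_nil, ← ih]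
    by_cases h : find_max_subsequence_common dna_seq L = []
    · simp [h, PySem.List.sorted_eq_nil_iff]
    · have h1 : (find_max_subsequence_common dna_seq L).isEmpty = false := by
        simpa [List.isEmpty_iff] using h
      have h2 : (PySem.List.sorted (find_max_subsequence_common dna_seq L) (fun x => x)).isEmpty = false := by
        simp [PySem.List.sorted_eq_nil_iff, h]
      simp [h1, h2]

theorem pvNatRangeRev (n : Nat) :
    ((List.range n).map (fun k : Nat => (n : Int) - (k : Int))).reverse
      = (List.range n).map (fun k : Nat => 1 + (k : Int)) := by
  induction n with
  | zero => simp
  | succ n ih =>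
    conv_lhs => rw [List.range_succ_eq_map]
    conv_rhs => rw [List.range_succ]
    simp only [List.map_cons, List.map_map, List.reverse_cons, List.map_append, List.map_nil]
    have hfun : (List.range n).map ((fun k : Nat => ((n + 1 : Nat) : Int) - (k : Int)) ∘ Nat.succ)
        = (List.range n).map (fun k : Nat => (n : Int) - (k : Int)) :=
      List.map_congr_left (fun k _ => by simp only [Function.comp_apply, Nat.succ_eq_add_one]; push_cast; ring)
    rw [hfun, ih]
    simp only [Nat.cast_zero, sub_zero]
    have h3 : ((n + 1 : Nat) : Int) = 1 + (n : Int) := by push_cast; ring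
    rw [h3]

theorem pvRangeRev (m : Int) :
    (PySem.List.pyRange m 0 (-1)).reverse = PySem.List.pyRange 1 (m + 1) 1 := by
  by_cases hm : m ≤ 0
  · rw [PySem.List.pyRange_neg_one_eq_nil hm, PySem.List.pyRange_one_eq_nil (by omega)]
    rfl
  · obtain ⟨n, rfl⟩ : ∃ n : Nat, m = (n : Int) := ⟨m.toNat, by omega⟩
    rw [PySem.List.pyRange_neg_one, PySem.List.pyRange_one]
    have h1 : ((n : Int) - 0).toNat = n := by omega
    have h2 : ((n : Int) + 1 - 1).toNat = n := by omega
    rw [h1, h2]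
    exact pvNatRangeRev n

-- ===== VERDICT (by name: the statement is the Claim_ definition above) =====
theorem find_max_subsequence_spec : Claim_equal_find_max_subsequence := by
  intro dna_seq _ hpre
  unfold Spec_find_max_subsequence
  unfold find_max_subsequence find_max_subsequence_alt
  cases hmin : PySem.List.min? (dna_seq.map PySem.Str.len) (fun x => x) with
  | none =>
    exact absurd (List.map_eq_nil_iff.mp ((PySem.List.min?_eq_none_iff _ _).mp hmin)) hpre
  | some m =>
    simp only
    rw [pvLoopA_eq, pvRangeRev]
    refine PySem.List.foldl_congr_mem _ _ _ _ (fun best L _ => ?_)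
    simp only [pvCommon_eq]
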